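-- pv_equiv track=rewrite | github.com/NishantBaheti/LearningPython | solved_questions/count_vowels.py | count_vowels
-- ===== SOURCE A (Python) =====
-- def count_vowels(string):
--     new_string = ""
--     vowel_count = {
--         "a" : 0,
--         "e" : 0,
--         "i" : 0,
--         "o" : 0,
--         "u" : 0
--     }
--     vowels = vowel_count.keys()
--     for i in string:
--         if i.lower() in vowels:
--             vowel_count[i.lower()] += 1
--         else:
--             new_string += str(i)
--     return new_string,vowel_count
-- ===== SOURCE B (Python) =====
-- def count_vowels(string):
--     new_string = "".join(c for c in string if c.lower() not in "aeiou")
--     low = string.lower()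
--     vowel_count = {v: low.count(v) for v in "aeiou"}
--     return new_string, vowel_count
-- ===== Notes on version B (the rewrite author's own statement) =====
-- stated objective: simpler
-- what changed: Replaces the single per-character loop that threads a mutable dict with two separate passes: a join-comprehension keeping non-vowel characters, and a dict comprehension over the five vowels counting each with str.count on the lowered string.
import Mathlib
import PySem

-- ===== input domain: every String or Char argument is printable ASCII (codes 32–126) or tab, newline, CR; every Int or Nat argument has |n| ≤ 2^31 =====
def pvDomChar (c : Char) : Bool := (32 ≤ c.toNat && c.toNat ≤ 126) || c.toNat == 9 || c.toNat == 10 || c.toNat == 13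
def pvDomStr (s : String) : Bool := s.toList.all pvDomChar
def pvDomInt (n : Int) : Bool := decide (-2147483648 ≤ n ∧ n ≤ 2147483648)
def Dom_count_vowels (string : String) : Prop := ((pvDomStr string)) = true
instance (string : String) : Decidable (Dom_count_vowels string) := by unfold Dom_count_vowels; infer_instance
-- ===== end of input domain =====

-- B computes the same result in two separate passes (a filter comprehension for the stripped
-- string and a per-vowel count over the lowered string) instead of A's single loop threading a
-- mutable dict; same return value, objective: simpler decomposition.


-- ===== PORT A =====
-- A's loop body: if i.lower() in vowel_count.keys(): vowel_count[i.lower()] += 1 else: new_string += str(i)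
def pvStepA (st : List Char × PySem.Dict String Int) (i : Char) : List Char × PySem.Dict String Int :=
  let li := PySem.Str.lower (String.ofList [i])
  if st.2.contains li then (st.1, st.2.modify li 0 (· + 1))
  else (st.1 ++ [i], st.2)

def count_vowels (string : String) : String × (List (String × Int)) :=
  (String.ofList (string.toList.foldl pvStepA
      ([], PySem.Dict.ofList [("a", 0), ("e", 0), ("i", 0), ("o", 0), ("u", 0)])).1,
   (string.toList.foldl pvStepA
      ([], PySem.Dict.ofList [("a", 0), ("e", 0), ("i", 0), ("o", 0), ("u", 0)])).2.items)

-- ===== PORT B =====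
-- new_string = "".join(c for c in string if c.lower() not in "aeiou");
-- vowel_count = {v: string.lower().count(v) for v in "aeiou"}
def count_vowels_alt (string : String) : String × (List (String × Int)) :=
  (String.ofList (string.toList.filter
     (fun c => !(PySem.Str.isIn (PySem.Str.lower (String.ofList [c])) "aeiou"))),
   "aeiou".toList.map
     (fun v => (String.ofList [v], (PySem.Str.count (PySem.Str.lower string) (String.ofList [v]) : Int))))

-- ===== PRECONDITION & SPEC =====
def Spec_count_vowels (string : String) (out : String × (List (String × Int))) : Prop := out = count_vowels_alt string
instance (string : String) (out : String × (List (String × Int))) : Decidable (Spec_count_vowels string out) := by unfold Spec_count_vowels; infer_instance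

-- ===== CLAIM (what is proved, stated in full; the proofs are below) =====
def Claim_equal_count_vowels : Prop := ∀ (string : String), Dom_count_vowels string → Spec_count_vowels string (count_vowels string)

-- ===== LEMMAS AND PROOFS =====

-- the lowered single-character string A uses as dict key
def pvLowStr (c : Char) : String := String.ofList [PySem.Chars.lowerChar c]

def pvIsVowelStr (s : String) : Bool := s ∈ (["a", "e", "i", "o", "u"] : List String)

lemma pvLower_single (c : Char) :
    PySem.Str.lower (String.ofList [c]) = pvLowStr c := by
  simp [PySem.Str.lower, PySem.Chars.lower, pvLowStr]

lemma pvD0_mk :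
    PySem.Dict.ofList [("a", (0:Int)), ("e", 0), ("i", 0), ("o", 0), ("u", 0)]
      = PySem.Dict.mk [("a", 0), ("e", 0), ("i", 0), ("o", 0), ("u", 0)] := by decide

lemma pvD0_contains (s : String) :
    (PySem.Dict.ofList [("a", (0:Int)), ("e", 0), ("i", 0), ("o", 0), ("u", 0)]).contains s
      = pvIsVowelStr s := by
  rw [pvD0_mk]
  have hb : ∀ a b : String, (a == b) = decide (b = a) := by
    intro a b
    by_cases h : b = a
    · subst h; simp
    · have h2 : ¬ a = b := fun hh => h hh.symm
      simp [h, h2]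
  simp [PySem.Dict.contains_mk, pvIsVowelStr, hb]

-- invariant of A's fold: string part filters non-vowels, keys are unchanged, counts accumulate
lemma pvFoldA_inv (l : List Char) :
    ∀ (acc : List Char) (d : PySem.Dict String Int),
    (∀ s, d.contains s = pvIsVowelStr s) →
    (l.foldl pvStepA (acc, d)).1 = acc ++ l.filter (fun c => !pvIsVowelStr (pvLowStr c)) ∧
    (l.foldl pvStepA (acc, d)).2.keys = d.keys ∧
    (∀ v, pvIsVowelStr v →
      ((l.foldl pvStepA (acc, d)).2).getD v 0 = d.getD v 0 + ((l.map pvLowStr).count v : Int)) := by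
  induction l with
  | nil => intro acc d _; simp
  | cons c t ih =>
    intro acc d hd
    simp only [List.foldl_cons, pvStepA, pvLower_single, hd]
    by_cases hv : pvIsVowelStr (pvLowStr c)
    · simp only [hv, if_pos]
      have hd' : ∀ s, (d.modify (pvLowStr c) 0 (· + 1)).contains s = pvIsVowelStr s := by
        intro s; rw [PySem.Dict.contains_modify, hd]
        by_cases hs : s = pvLowStr c
        · subst hs; simp [hv]
        · simp [hs]
      obtain ⟨h1, h2, h3⟩ := ih acc (d.modify (pvLowStr c) 0 (· + 1)) hd'
      refine ⟨by simpa [List.filter_cons, hv] using h1,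
        by rw [h2, PySem.Dict.keys_modify]
           exact PySem.Dict.keys_insert_of_contains d _ (by rw [hd]; exact hv), ?_⟩
      intro v hvv
      rw [h3 v hvv, PySem.Dict.getD_modify]
      by_cases hev : v = pvLowStr c
      · subst hev; simp; ring
      · simp [hev, Ne.symm hev]
    · simp only [hv, if_neg, Bool.false_eq_true, not_false_iff]
      obtain ⟨h1, h2, h3⟩ := ih (acc ++ [c]) d hd
      refine ⟨by simpa [List.filter_cons, hv] using h1, h2, ?_⟩
      intro v hvv
      rw [h3 v hvv]
      have hne : ¬ pvLowStr c = v := by rintro rfl; exact hv hvv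
      simp [hne]

lemma pvD0_keys :
    (PySem.Dict.ofList [("a", (0:Int)), ("e", 0), ("i", 0), ("o", 0), ("u", 0)]).keys
      = ["a", "e", "i", "o", "u"] := by decide

lemma pvD0_getD (v : String) :
    (PySem.Dict.ofList [("a", (0:Int)), ("e", 0), ("i", 0), ("o", 0), ("u", 0)]).getD v 0 = 0 := by
  by_cases h : pvIsVowelStr v
  · simp only [pvIsVowelStr, List.mem_cons, List.not_mem_nil, or_false, decide_eq_true_eq] at h
    rcases h with rfl | rfl | rfl | rfl | rfl <;> decide
  · exact PySem.Dict.getD_of_not_contains _ _ (by rw [pvD0_contains]; simpa using h)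

-- single-character Str.count is List.count
lemma pvCount_go_singleton (c : Char) :
    ∀ (fuel : Nat) (l : List Char) (acc : Nat), l.length ≤ fuel →
    PySem.Chars.count.go [c] fuel l acc = acc + l.count c := by
  intro fuel
  induction fuel with
  | zero => intro l acc h; interval_cases hl : l.length; rw [List.length_eq_zero_iff] at hl; simp [hl, PySem.Chars.count.go]
  | succ n ih =>
    intro l acc h
    cases l with
    | nil => simp [PySem.Chars.count.go]
    | cons x t =>
      rw [PySem.Chars.count.go]
      by_cases hx : c = x
      · subst hx
        simp only [List.isPrefixOf, BEq.rfl, Bool.true_and, if_pos]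
        rw [List.length_singleton, List.drop_succ_cons, List.drop_zero,
          ih t (acc + 1) (by simpa using h)]
        simp; ring
      · have : ([c].isPrefixOf (x :: t)) = false := by
          simp [List.isPrefixOf, hx]
        rw [this]
        simp only [Bool.false_eq_true, if_neg, not_false_iff]
        rw [ih t acc (by simpa using h)]
        have : ¬ x = c := fun hh => hx hh.symm
        simp [this]

lemma pvCount_singleton (l : List Char) (c : Char) :
    PySem.Chars.count l [c] = l.count c := by
  simp only [PySem.Chars.count, List.isEmpty_cons, Bool.false_eq_true, if_neg, not_false_iff]
  simpa using pvCount_go_singleton c l.length l 0 le_rfl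

lemma pvIsIn_singleton (c : Char) (l : List Char) :
    PySem.Chars.isIn [c] l = l.contains c := by
  by_cases h : c ∈ l
  · rw [List.contains_iff_mem.mpr h]
    obtain ⟨s1, s2, rfl⟩ := List.mem_iff_append.mp h
    exact (PySem.Chars.isIn_iff_infix _ _).mpr ⟨s1, s2, by simp⟩
  · rw [show l.contains c = false by simpa using h]
    exact (PySem.Chars.isIn_eq_false_iff _ _).mpr (fun hin => h (hin.subset (by simp)))

lemma pvVowelStr_iff (x : Char) :
    pvIsVowelStr (String.ofList [x]) = (x ∈ ['a', 'e', 'i', 'o', 'u'] : Bool) := by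
  simp only [pvIsVowelStr]
  have : ∀ (c : Char), (String.ofList [x] = String.ofList [c]) ↔ x = c := by
    intro c; rw [String.ofList_inj]; simp
  simp only [List.mem_cons, List.not_mem_nil, or_false]
  rw [show ("a":String) = String.ofList ['a'] from rfl, show ("e":String) = String.ofList ['e'] from rfl,
      show ("i":String) = String.ofList ['i'] from rfl, show ("o":String) = String.ofList ['o'] from rfl,
      show ("u":String) = String.ofList ['u'] from rfl]
  simp [this]

lemma pvLowStr_inj : Function.Injective (fun c : Char => String.ofList [c]) := by
  intro a b h; rw [String.ofList_inj] at h; simpa using h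

-- counting a vowel string among the lowered single-char strings = counting the lowered char
lemma pvCount_lowstr (l : List Char) (v : Char) :
    (l.map pvLowStr).count (String.ofList [v]) = (l.map PySem.Chars.lowerChar).count v := by
  have : l.map pvLowStr = (l.map PySem.Chars.lowerChar).map (fun c => String.ofList [c]) := by
    simp [pvLowStr, Function.comp]
  rw [this, List.count_map_of_injective _ _ pvLowStr_inj]

-- ===== VERDICT (by name: the statement is the Claim_ definition above) =====
set_option maxHeartbeats 1000000 in
theorem count_vowels_spec : Claim_equal_count_vowels := by
  intro s _
  unfold Spec_count_vowels count_vowels count_vowels_alt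
  obtain ⟨h1, h2, h3⟩ := pvFoldA_inv s.toList []
    (PySem.Dict.ofList [("a", 0), ("e", 0), ("i", 0), ("o", 0), ("u", 0)]) pvD0_contains
  refine Prod.ext ?_ ?_
  · -- stripped strings agree
    simp only [h1, List.nil_append]
    rw [String.ofList_inj]
    apply List.filter_congr
    intro c _
    rw [pvLower_single, PySem.Str.isIn_eq]
    simp only [pvLowStr, String.toList_ofList]
    rw [pvIsIn_singleton, pvVowelStr_iff]
    simp
  · -- dicts-as-item-lists agree
    have hnd : (s.toList.foldl pvStepA
        ([], PySem.Dict.ofList [("a", 0), ("e", 0), ("i", 0), ("o", 0), ("u", 0)])).2.keys.Nodup := by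
      rw [h2, pvD0_keys]; decide
    rw [PySem.Dict.items_eq_map_keys _ hnd 0, h2, pvD0_keys]
    have hlow : (PySem.Str.lower s).toList = s.toList.map PySem.Chars.lowerChar := by
      simp [PySem.Chars.lower]
    have hcnt : ∀ (v : Char), v ∈ ['a','e','i','o','u'] →
        (s.toList.foldl pvStepA
          ([], PySem.Dict.ofList [("a", 0), ("e", 0), ("i", 0), ("o", 0), ("u", 0)])).2.getD
            (String.ofList [v]) 0
          = (PySem.Str.count (PySem.Str.lower s) (String.ofList [v]) : Int) := by
      intro v hv
      rw [h3 (String.ofList [v]) (by rw [pvVowelStr_iff]; simpa using hv), pvD0_getD,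
        PySem.Str.count_eq]
      simp only [String.toList_ofList, hlow]
      rw [pvCount_singleton, pvCount_lowstr]
      simp
    have h5 : ("aeiou" : String).toList = ['a','e','i','o','u'] := by decide
    rw [h5]
    simp only [List.map_cons, List.map_nil]
    rw [show ("a":String) = String.ofList ['a'] from rfl, show ("e":String) = String.ofList ['e'] from rfl,
        show ("i":String) = String.ofList ['i'] from rfl, show ("o":String) = String.ofList ['o'] from rfl,
        show ("u":String) = String.ofList ['u'] from rfl]
    rw [hcnt 'a' (by simp), hcnt 'e' (by simp), hcnt 'i' (by simp), hcnt 'o' (by simp),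
        hcnt 'u' (by simp)]
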